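-- pv_equiv track=rewrite | github.com/dang3r/forge | functions/filter_for_strings_with_us_states_in_them.py | filter_for_strings_with_us_states_in_them
-- ===== SOURCE A (Python) =====
-- def filter_for_strings_with_us_states_in_them(strings: list):
--     """
--     This function takes in a list of strings and filters out only those which contain the name of a US state.
--     """
--     us_states = ['Alabama', 'Alaska', 'Arizona', 'Arkansas', 'California', 'Colorado', 'Connecticut', 'Delaware',
--                 'Florida', 'Georgia', 'Hawaii', 'Idaho', 'Illinois', 'Indiana', 'Iowa', 'Kansas', 'Kentucky',
--                 'Louisiana', 'Maine', 'Maryland', 'Massachusetts', 'Michigan', 'Minnesota', 'Mississippi',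
--                 'Missouri', 'Montana', 'Nebraska', 'Nevada', 'New Hampshire', 'New Jersey', 'New Mexico',
--                 'New York', 'North Carolina', 'North Dakota', 'Ohio', 'Oklahoma', 'Oregon', 'Pennsylvania',
--                 'Rhode Island', 'South Carolina', 'South Dakota', 'Tennessee', 'Texas', 'Utah', 'Vermont', 'Virginia',
--                 'Washington', 'West Virginia', 'Wisconsin', 'Wyoming']
--
--     filtered_strings = []
--     for string in strings:
--         for state in us_states:
--             if state in string:
--                 filtered_strings.append(string)
--                 break
--
--     return filtered_strings
-- ===== SOURCE B (Python) =====
-- def filter_for_strings_with_us_states_in_them(strings: list):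
--     """
--     Same result as A, by a different algorithm: index the state names by their
--     first character once, then make a single left-to-right pass over each string,
--     at each position trying only the states that start with the character there.
--     """
--     us_states = ['Alabama', 'Alaska', 'Arizona', 'Arkansas', 'California', 'Colorado', 'Connecticut', 'Delaware',
--                 'Florida', 'Georgia', 'Hawaii', 'Idaho', 'Illinois', 'Indiana', 'Iowa', 'Kansas', 'Kentucky',
--                 'Louisiana', 'Maine', 'Maryland', 'Massachusetts', 'Michigan', 'Minnesota', 'Mississippi',
--                 'Missouri', 'Montana', 'Nebraska', 'Nevada', 'New Hampshire', 'New Jersey', 'New Mexico',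
--                 'New York', 'North Carolina', 'North Dakota', 'Ohio', 'Oklahoma', 'Oregon', 'Pennsylvania',
--                 'Rhode Island', 'South Carolina', 'South Dakota', 'Tennessee', 'Texas', 'Utah', 'Vermont', 'Virginia',
--                 'Washington', 'West Virginia', 'Wisconsin', 'Wyoming']
--
--     index = {}
--     for st in us_states:
--         index.setdefault(st[0], []).append(st)
--
--     def hit(s):
--         return any(st == s[i:i + len(st)]
--                    for i, c in enumerate(s)
--                    for st in index.get(c, []))
--
--     return [s for s in strings if hit(s)]
-- ===== Notes on version B (the rewrite author's own statement) =====
-- stated objective: alternative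
-- what changed: Replaces A's per-string scan over all 50 states (each a full substring search) by a first-letter index of the state names built once, plus a single left-to-right pass over each string that tries only the states starting with the character at the current position.
import Mathlib
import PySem

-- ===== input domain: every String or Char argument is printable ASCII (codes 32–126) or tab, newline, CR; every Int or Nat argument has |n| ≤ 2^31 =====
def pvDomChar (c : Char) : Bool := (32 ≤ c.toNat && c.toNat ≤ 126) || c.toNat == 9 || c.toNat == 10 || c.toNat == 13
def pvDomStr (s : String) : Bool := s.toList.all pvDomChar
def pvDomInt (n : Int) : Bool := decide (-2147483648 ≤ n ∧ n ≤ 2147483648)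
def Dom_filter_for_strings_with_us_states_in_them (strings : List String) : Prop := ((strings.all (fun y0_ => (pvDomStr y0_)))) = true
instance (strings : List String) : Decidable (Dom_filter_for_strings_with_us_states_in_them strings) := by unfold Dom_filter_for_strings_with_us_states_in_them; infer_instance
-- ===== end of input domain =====

-- B replaces A's scan over all 50 states per string by a first-letter index of the
-- state names and one left-to-right pass per string (alternative decomposition, not
-- claimed faster).

-- the constant list of US state names, shared verbatim by both programs
def pvUsStates : List String := ["Alabama", "Alaska", "Arizona", "Arkansas", "California", "Colorado", "Connecticut", "Delaware",
  "Florida", "Georgia", "Hawaii", "Idaho", "Illinois", "Indiana", "Iowa", "Kansas", "Kentucky",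
  "Louisiana", "Maine", "Maryland", "Massachusetts", "Michigan", "Minnesota", "Mississippi",
  "Missouri", "Montana", "Nebraska", "Nevada", "New Hampshire", "New Jersey", "New Mexico",
  "New York", "North Carolina", "North Dakota", "Ohio", "Oklahoma", "Oregon", "Pennsylvania",
  "Rhode Island", "South Carolina", "South Dakota", "Tennessee", "Texas", "Utah", "Vermont", "Virginia",
  "Washington", "West Virginia", "Wisconsin", "Wyoming"]

-- ===== PORT A =====
-- A's inner 'for state in us_states: if state in string: append; break'
def pvAInner (string : String) (acc : List String) : List String → List String
  | [] => acc
  | st :: rest => if PySem.Str.isIn st string then acc ++ [string] else pvAInner string acc rest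

def filter_for_strings_with_us_states_in_them (strings : List String) : List String :=
  strings.foldl (fun acc s => pvAInner s acc pvUsStates) []

-- ===== PORT B =====
-- st[0]; every state name is nonempty, so the default is never used
def pvFirstChar (st : String) : Char := st.toList.headD ' '

-- index.setdefault(st[0], []).append(st) over all states
def pvIndex : PySem.Dict Char (List String) :=
  pvUsStates.foldl (fun d st => d.modify (pvFirstChar st) [] (· ++ [st])) PySem.Dict.empty

-- hit(s): any(st == s[i:i+len(st)] for i, c in enumerate(s) for st in index.get(c, []))
def pvHit (index : PySem.Dict Char (List String)) (s : String) : Bool :=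
  (PySem.List.enumerate s.toList 0).any (fun ic =>
    ((index.getD ic.2 []).any (fun st =>
      st == PySem.Str.slice s (some ic.1) (some (ic.1 + PySem.Str.len st)))))

def filter_for_strings_with_us_states_in_them_alt (strings : List String) : List String :=
  strings.filter (fun s => pvHit pvIndex s)

-- ===== PRECONDITION & SPEC =====
def Spec_filter_for_strings_with_us_states_in_them (strings : List String) (out : List String) : Prop := out = filter_for_strings_with_us_states_in_them_alt strings
instance (strings : List String) (out : List String) : Decidable (Spec_filter_for_strings_with_us_states_in_them strings out) := by unfold Spec_filter_for_strings_with_us_states_in_them; infer_instance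

-- ===== CLAIM (what is proved, stated in full; the proofs are below) =====
def Claim_equal_filter_for_strings_with_us_states_in_them : Prop := ∀ (strings : List String), Dom_filter_for_strings_with_us_states_in_them strings → Spec_filter_for_strings_with_us_states_in_them strings (filter_for_strings_with_us_states_in_them strings)

-- ===== LEMMAS AND PROOFS =====

-- A's inner loop appends the string exactly when some state is contained in it
lemma pvAInner_eq (s : String) (acc : List String) (l : List String) :
    pvAInner s acc l = if l.any (fun st => PySem.Str.isIn st s) then acc ++ [s] else acc := by
  induction l with
  | nil => simp [pvAInner]
  | cons st rest ih =>
    show (if PySem.Str.isIn st s then acc ++ [s] else pvAInner s acc rest) = _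
    cases h : PySem.Str.isIn st s
    · rw [if_neg (by simp), ih, List.any_cons, h, Bool.false_or]
    · rw [if_pos rfl, List.any_cons, h, Bool.true_or, if_pos rfl]

-- membership in list(enumerate(l, s))
lemma pv_mem_enumerate {α : Type} (l : List α) (s i : Int) (x : α) :
    (i, x) ∈ PySem.List.enumerate l s ↔ ∃ j : Nat, i = s + j ∧ l[j]? = some x := by
  induction l generalizing s i with
  | nil => simp [PySem.List.enumerate_nil]
  | cons a t ih =>
    rw [PySem.List.enumerate_cons]
    simp only [List.mem_cons, Prod.mk.injEq]
    constructor
    · rintro (⟨rfl, rfl⟩ | h)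
      · exact ⟨0, by simp, by simp⟩
      · obtain ⟨j, hji, hj⟩ := (ih (s + 1) i).mp h
        exact ⟨j + 1, by push_cast; omega, by simpa using hj⟩
    · rintro ⟨j, rfl, hj⟩
      cases j with
      | zero =>
        left
        simp only [List.getElem?_cons_zero, Option.some.injEq] at hj
        exact ⟨by simp, hj.symm⟩
      | succ j =>
        right
        exact (ih (s + 1) _).mpr ⟨j, by push_cast; ring, by simpa using hj⟩

-- the buckets of the first-letter index
lemma pv_mem_index (c : Char) (st : String) :
    st ∈ pvIndex.getD c [] ↔ st ∈ pvUsStates ∧ pvFirstChar st = c := by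
  have key : pvIndex
      = ((pvUsStates.map fun st => (pvFirstChar st, st)).foldl
          (fun d p => d.modify p.1 [] (· ++ [p.2])) PySem.Dict.empty) := by
    unfold pvIndex
    exact (@List.foldl_map _ _ _ (fun st => (pvFirstChar st, st))
      (fun (d : PySem.Dict Char (List String)) p => d.modify p.1 [] (· ++ [p.2]))
      pvUsStates PySem.Dict.empty).symm
  rw [key, PySem.Dict.getD_foldl_modify_append]
  simp only [PySem.Dict.getD_empty, List.nil_append, List.filter_map, List.map_map,
    List.mem_map, Function.comp, List.mem_filter]
  constructor
  · rintro ⟨a, ⟨ha, hk⟩, rfl⟩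
    exact ⟨ha, by simpa using hk⟩
  · rintro ⟨ha, hk⟩
    exact ⟨st, ⟨ha, by simpa using hk⟩, rfl⟩

-- every state name is nonempty
lemma pv_states_nonempty : ∀ st ∈ pvUsStates, st.toList ≠ [] := by decide

-- B's per-string check agrees with A's 'some state is a substring of it'
lemma pv_hit_iff (s : String) :
    pvHit pvIndex s = (pvUsStates.any fun st => PySem.Str.isIn st s) := by
  rw [Bool.eq_iff_iff]
  unfold pvHit
  simp only [List.any_eq_true, beq_iff_eq, Prod.exists]
  constructor
  · rintro ⟨i, c, hmem, st, hbkt, heq⟩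
    obtain ⟨hst, -⟩ := (pv_mem_index c st).mp hbkt
    obtain ⟨j, rfl, hj⟩ := (pv_mem_enumerate s.toList 0 i c).mp hmem
    refine ⟨st, hst, ?_⟩
    rw [PySem.Str.isIn_eq, ← PySem.Chars.exists_prefix_drop_iff_isIn]
    refine ⟨j, ?_⟩
    have h1 := congrArg String.toList heq
    rw [PySem.Str.len_eq] at h1
    simp only [zero_add] at h1
    have h2 : (PySem.Str.slice s (some (j:Int)) (some ((j:Int) + (st.toList.length:Int)))).toList
        = (s.toList.drop j).take st.toList.length := by
      simp [PySem.Str.slice]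
      rw [PySem.List.slice_natCast_add]
    rw [h2] at h1
    rw [h1]
    exact List.take_prefix _ _
  · rintro ⟨st, hst, hin⟩
    rw [PySem.Str.isIn_eq, ← PySem.Chars.exists_prefix_drop_iff_isIn] at hin
    obtain ⟨j, hpre⟩ := hin
    have hne := pv_states_nonempty st hst
    obtain ⟨c0, tl, hc0⟩ : ∃ c0 tl, st.toList = c0 :: tl := by
      cases h : st.toList with
      | nil => exact absurd h hne
      | cons a b => exact ⟨a, b, rfl⟩
    obtain ⟨rest, hrest⟩ := hpre
    have hj : s.toList[j]? = some c0 := by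
      have h0 : (s.toList.drop j)[0]? = some c0 := by rw [← hrest, hc0]; simp
      simpa [List.getElem?_drop] using h0
    refine ⟨(j : Int), c0, (pv_mem_enumerate s.toList 0 (j : Int) c0).mpr ⟨j, by ring, hj⟩, st,
      (pv_mem_index c0 st).mpr ⟨hst, by simp [pvFirstChar, hc0]⟩, ?_⟩
    rw [← String.toList_inj, PySem.Str.len_eq]
    have h2 : (PySem.Str.slice s (some (j:Int)) (some ((j:Int) + (st.toList.length:Int)))).toList
        = (s.toList.drop j).take st.toList.length := by
      simp [PySem.Str.slice]
      rw [PySem.List.slice_natCast_add]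
    rw [h2, ← hrest]
    simp

-- ===== VERDICT (by name: the statement is the Claim_ definition above) =====
theorem filter_for_strings_with_us_states_in_them_spec : Claim_equal_filter_for_strings_with_us_states_in_them := by
  intro strings _
  unfold Spec_filter_for_strings_with_us_states_in_them
  unfold filter_for_strings_with_us_states_in_them filter_for_strings_with_us_states_in_them_alt
  simp only [pvAInner_eq]
  rw [show (fun (acc : List String) (s : String) =>
        if pvUsStates.any (fun st => PySem.Str.isIn st s) then acc ++ [s] else acc)
      = (fun acc s => if (fun s => pvUsStates.any (fun st => PySem.Str.isIn st s)) s then acc ++ [id s] else acc) from rfl]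
  rw [PySem.List.foldl_append_if]
  simp only [List.map_id, List.nil_append]
  exact (List.filter_congr (fun s _ => (pv_hit_iff s))).symm
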